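-- pv_equiv track=rewrite | github.com/calhounbryce13/data-structures-practice | Random_Problems/se_range.py | se_range
-- ===== SOURCE A (Python) =====
-- def se_range(start: int, end: int):
--     """
--     DESCRIPTION: Function to take an input an integer start value and
--                  an integer end value. Function will then create and return
--                  a list with all the values in between inclusively.
--
--     """
--
--     # getting the correct size for the return list
--     new_array_size = ((2 + (abs(start - end))) - 1)
--
--     # initializing a python list containing all zeros with the correct size
--     newArr = [0] * new_array_size
--
--     # setting the initial value to be the start integer
--     initial_val = start
--
--     # looping through the new array and assigning values based on the init value
--     for x in range(new_array_size):
--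
--         # if end is less than start then we count down instead of up
--         if end < start:
--             newArr[x] = (initial_val - x)
--         else:
--             newArr[x] = (initial_val + x)
--
--     return newArr
-- ===== SOURCE B (Python) =====
-- def se_range(start: int, end: int):
--     lo, hi = (start, end) if start <= end else (end, start)
--     asc = list(range(lo, hi + 1))
--     return asc if start <= end else asc[::-1]
-- ===== Notes on version B (the rewrite author's own statement) =====
-- stated objective: alternative
-- what changed: Instead of A's preallocated zero array filled by an index loop with a per-iteration direction branch, B normalizes the endpoints to lo<=hi, builds the ascending inclusive sequence once, and reverses it in a second pass when the input was descending, so no per-element direction arithmetic exists at all.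
import Mathlib
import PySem

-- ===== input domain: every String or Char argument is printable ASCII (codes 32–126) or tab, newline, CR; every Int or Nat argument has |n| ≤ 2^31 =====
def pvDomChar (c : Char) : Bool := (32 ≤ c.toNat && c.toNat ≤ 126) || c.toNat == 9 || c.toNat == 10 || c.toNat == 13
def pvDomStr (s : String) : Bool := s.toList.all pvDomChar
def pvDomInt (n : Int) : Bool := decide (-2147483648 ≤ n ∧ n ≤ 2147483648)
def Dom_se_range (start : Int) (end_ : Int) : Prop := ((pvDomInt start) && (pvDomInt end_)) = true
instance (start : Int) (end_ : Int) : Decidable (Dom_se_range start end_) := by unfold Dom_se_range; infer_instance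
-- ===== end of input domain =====

-- B normalizes the endpoints to lo ≤ hi, builds the ascending inclusive sequence once,
-- and reverses it in a second pass when the input was descending — no preallocated zero
-- array, no index loop, no per-iteration direction branch. Objective: alternative.


-- ===== PORT A =====
-- Literal port: size computation, zero-filled list, index loop assigning via set.
-- The loop index x is always a valid index (0 ≤ x < length), so `.set x.toNat` is
-- exact for Python's `newArr[x] = …` here.
def se_range (start : Int) (end_ : Int) : List Int :=
  let new_array_size : Int := (2 + (start - end_).natAbs) - 1
  let newArr : List Int := List.replicate new_array_size.toNat 0
  let initial_val := start
  (PySem.List.pyRange 0 new_array_size 1).foldl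
    (fun arr x =>
      if end_ < start then arr.set x.toNat (initial_val - x)
      else arr.set x.toNat (initial_val + x))
    newArr

-- ===== PORT B =====
-- asc[::-1] is ported as asc.reverse (exact: PySem.List.slice?_none_none_neg_one).
def se_range_alt (start : Int) (end_ : Int) : List Int :=
  let lo : Int := if start ≤ end_ then start else end_
  let hi : Int := if start ≤ end_ then end_ else start
  let asc : List Int := PySem.List.pyRange lo (hi + 1) 1
  if start ≤ end_ then asc else asc.reverse

-- ===== PRECONDITION & SPEC =====
def Spec_se_range (start : Int) (end_ : Int) (out : List Int) : Prop := out = se_range_alt start end_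
instance (start : Int) (end_ : Int) (out : List Int) : Decidable (Spec_se_range start end_ out) := by unfold Spec_se_range; infer_instance

-- ===== CLAIM (what is proved, stated in full; the proofs are below) =====
def Claim_equal_se_range : Prop := ∀ (start : Int) (end_ : Int), Dom_se_range start end_ → Spec_se_range start end_ (se_range start end_)

-- ===== LEMMAS AND PROOFS =====

-- Filling an array by index: folding `set k (f k)` over range n rewrites the first n
-- entries of arr to (range n).map f, leaving the tail untouched.
theorem fill_by_set (f : Nat → Int) :
    ∀ (n : Nat) (arr : List Int), n ≤ arr.length →
      (List.range n).foldl (fun a k => a.set k (f k)) arr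
        = (List.range n).map f ++ arr.drop n := by
  intro n
  induction n with
  | zero => simp
  | succ m ih =>
    intro arr h
    have hm : m ≤ arr.length := by omega
    rw [List.range_succ, List.foldl_append, ih arr hm]
    have hlen : ((List.range m).map f).length = m := by simp
    simp only [List.foldl_cons, List.foldl_nil, List.map_append, List.map_cons,
      List.map_nil, List.append_assoc]
    rw [List.set_append_right m (f m) (by omega), hlen, Nat.sub_self,
      List.drop_eq_getElem_cons (show m < arr.length by omega), List.set_cons_zero]
    simp

-- A's fold equals the closed map form.
theorem seA_closed (start end_ : Int) (n : Nat) :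
    (PySem.List.pyRange 0 (n : Int) 1).foldl
      (fun arr x =>
        if end_ < start then arr.set x.toNat (start - x)
        else arr.set x.toNat (start + x))
      (List.replicate n 0)
    = (List.range n).map
        (fun (k : Nat) => if end_ < start then start - (k : Int) else start + (k : Int)) := by
  rw [PySem.List.pyRange_zero_nat n, List.foldl_map]
  have hf : (fun (x : List Int) (y : Nat) =>
        if end_ < start then x.set ((y : Int)).toNat (start - (y : Int))
        else x.set ((y : Int)).toNat (start + (y : Int)))
      = (fun (x : List Int) (y : Nat) =>
          x.set y (if end_ < start then start - (y : Int) else start + (y : Int))) := by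
    funext x y
    split <;> simp
  rw [hf]
  have h := fill_by_set
      (fun (k : Nat) => if end_ < start then start - (k : Int) else start + (k : Int))
      n (List.replicate n 0) (by simp)
  simp only [List.drop_replicate, Nat.sub_self, List.replicate_zero, List.append_nil] at h
  exact h

-- ===== VERDICT (by name: the statement is the Claim_ definition above) =====

theorem se_range_spec : Claim_equal_se_range := by
  intro start end_ _
  unfold Spec_se_range se_range se_range_alt
  simp only []
  have hNn : ((2 : Int) + (start - end_).natAbs) - 1 = ((start - end_).natAbs + 1 : Nat) := by
    push_cast; ring
  rw [hNn]
  simp only [Int.toNat_natCast]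
  rw [seA_closed start end_ ((start - end_).natAbs + 1)]
  by_cases h : start ≤ end_
  · have hlt : ¬ (end_ < start) := by omega
    simp only [if_pos h, if_neg hlt]
    rw [PySem.List.pyRange_one start (end_ + 1)]
    have he : (end_ + 1 - start).toNat = (start - end_).natAbs + 1 := by omega
    rw [he]
  · have hlt : end_ < start := by omega
    simp only [if_neg h, if_pos hlt]
    have hrev := PySem.List.pyRange_neg_one_eq_reverse (a := start) (b := end_ - 1)
    have hE : end_ - 1 + 1 = end_ := by ring
    rw [hE] at hrev
    rw [← hrev, PySem.List.pyRange_neg_one start (end_ - 1)]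
    have he : (start - (end_ - 1)).toNat = (start - end_).natAbs + 1 := by omega
    rw [he]
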